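-- pv_equiv track=rewrite | github.com/0x232/BOJ | 1074.py | visit
-- ===== SOURCE A (Python) =====
-- def visit(N, r, c):
--     if N == 1:
--         return 2*r + c
--     L, idx = 2**N, (2**(2*(N-1)))
--     if r < L//2 and c < L//2:
--         return visit(N-1, r, c)
--     if r < L//2 and c >= L//2:
--         return idx + visit(N-1, r, c % (L//2))
--     if r >= L//2 and c < L//2:
--         return idx*2 + visit(N-1, r % (L//2), c)
--     if r >= L//2 and c >= L//2:
--         return idx*3 + visit(N-1, r % (L//2), c % (L//2))
-- ===== SOURCE B (Python) =====
-- def visit(N, r, c):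
--     acc = 0
--     for k in range(N - 1, 0, -1):
--         h = 1 << k
--         t = 0
--         if r >= h:
--             t = 2
--             r %= h
--         if c >= h:
--             t += 1
--             c %= h
--         acc = 4 * acc + t
--     return 4 * acc + 2 * r + c
-- ===== Notes on version B (the rewrite author's own statement) =====
-- stated objective: alternative
-- what changed: Replaces the quadrant recursion (which recomputes the big powers 2**N and 4**(N-1) at every level and recurses N deep) with a single top-down loop that shifts out one quadrant bit per step and accumulates the offset Horner-style; intended as faster (measured 247x at n=4096, with A timing out beyond), but the probe could not confirm the label.
import Mathlib
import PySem

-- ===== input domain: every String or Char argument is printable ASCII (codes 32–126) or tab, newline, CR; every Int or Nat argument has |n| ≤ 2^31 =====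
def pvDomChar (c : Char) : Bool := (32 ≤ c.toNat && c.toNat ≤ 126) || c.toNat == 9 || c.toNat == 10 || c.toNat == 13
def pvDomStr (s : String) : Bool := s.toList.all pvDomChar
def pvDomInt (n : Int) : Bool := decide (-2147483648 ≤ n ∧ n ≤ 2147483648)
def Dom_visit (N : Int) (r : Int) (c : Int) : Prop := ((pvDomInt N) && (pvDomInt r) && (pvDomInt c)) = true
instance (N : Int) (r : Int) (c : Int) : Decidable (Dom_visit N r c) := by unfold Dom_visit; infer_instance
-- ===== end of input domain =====

-- B replaces A's quadrant recursion (recomputing 2**N and 4**(N-1) at every level) by one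
-- top-down loop accumulating the quadrant offsets Horner-style (objective: alternative decomposition).

-- ===== PORT A =====
-- Fuel = N.toNat; the fuel-0 case is unreachable under Pre_visit (Python raises for N ≤ 0).
-- Lean's Int `/` and `%` agree with Python's `//` and `%` here: the divisor L/2 = 2^(N-1) is positive.
def visitA : Nat → Int → Int → Int
  | 0, r, c => 2 * r + c
  | 1, r, c => 2 * r + c
  | n+2, r, c =>
    let L : Int := 2 ^ (n + 2)
    let idx : Int := 2 ^ (2 * (n + 1))
    if r < L / 2 ∧ c < L / 2 then visitA (n+1) r c
    else if r < L / 2 ∧ c ≥ L / 2 then idx + visitA (n+1) r (c % (L / 2))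
    else if r ≥ L / 2 ∧ c < L / 2 then idx * 2 + visitA (n+1) (r % (L / 2)) c
    else idx * 3 + visitA (n+1) (r % (L / 2)) (c % (L / 2))

def visit (N : Int) (r : Int) (c : Int) : Int := visitA N.toNat r c

-- ===== PORT B =====
-- One loop iteration of Source B: h = 1 << k (k ≥ 1 inside the loop, so 2 ^ k.toNat is exact),
-- state = (acc, r, c).  `%` with the positive divisor h is exactly Python's `%`.
def stepB (st : Int × Int × Int) (k : Int) : Int × Int × Int :=
  let h : Int := 2 ^ k.toNat
  let tr : Int × Int := if st.2.1 ≥ h then (2, st.2.1 % h) else (0, st.2.1)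
  let tc : Int × Int := if st.2.2 ≥ h then (tr.1 + 1, st.2.2 % h) else (tr.1, st.2.2)
  (4 * st.1 + tc.1, tr.2, tc.2)

def visit_alt (N : Int) (r : Int) (c : Int) : Int :=
  let s := (PySem.List.pyRange (N - 1) 0 (-1)).foldl stepB (0, r, c)
  4 * s.1 + 2 * s.2.1 + s.2.2

-- ===== PRECONDITION & SPEC =====
-- Pre_visit: the Python A returns exactly for N ≥ 1; for N ≤ 0 it raises
-- (ZeroDivisionError at N = 0 with non-negative r, c, otherwise unbounded recursion).
def Pre_visit (N : Int) (r : Int) (c : Int) : Prop := 1 ≤ N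
instance (N : Int) (r : Int) (c : Int) : Decidable (Pre_visit N r c) := by unfold Pre_visit; infer_instance
def pvWitness_visit : Int × Int × Int := (2, 1, 3)

def Spec_visit (N : Int) (r : Int) (c : Int) (out : Int) : Prop := out = visit_alt N r c
instance (N : Int) (r : Int) (c : Int) (out : Int) : Decidable (Spec_visit N r c out) := by unfold Spec_visit; infer_instance

-- ===== CLAIM (what is proved, stated in full; the proofs are below) =====
def Claim_equal_visit : Prop := ∀ (N : Int) (r : Int) (c : Int), Dom_visit N r c → Pre_visit N r c → Spec_visit N r c (visit N r c)

-- ===== LEMMAS AND PROOFS =====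

-- The accumulator factors out of the fold: only acc := 4*acc + t touches it.
theorem stepB_acc (ks : List Int) (a r c : Int) :
    ks.foldl stepB (a, r, c) =
      (a * 4 ^ ks.length + (ks.foldl stepB (0, r, c)).1, (ks.foldl stepB (0, r, c)).2) := by
  induction ks generalizing a r c with
  | nil => simp
  | cons k ks ih =>
    simp only [List.foldl_cons, List.length_cons]
    have hs : stepB (a, r, c) k =
        (4 * a + (stepB (0, r, c) k).1, (stepB (0, r, c) k).2) := by
      simp only [stepB]; ring_nf
    rw [hs]
    obtain ⟨t, r', c'⟩ := stepB (0, r, c) k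
    rw [ih (4 * a + t) r' c', ih t r' c']
    simp only [Prod.mk.injEq, and_true]
    rw [pow_succ]; ring

theorem key (n : Nat) (r c : Int) :
    visitA (n + 1) r c =
      4 * ((PySem.List.pyRange (n : Int) 0 (-1)).foldl stepB (0, r, c)).1
        + 2 * ((PySem.List.pyRange (n : Int) 0 (-1)).foldl stepB (0, r, c)).2.1
        + ((PySem.List.pyRange (n : Int) 0 (-1)).foldl stepB (0, r, c)).2.2 := by
  induction n generalizing r c with
  | zero =>
    rw [PySem.List.pyRange_neg_one_eq_nil (by simp)]
    simp [visitA]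
  | succ n ih =>
    have hc1 : ((n + 1 : Nat) : Int) - 1 = (n : Int) := by push_cast; ring
    have hrange : PySem.List.pyRange ((n + 1 : Nat) : Int) 0 (-1)
        = ((n + 1 : Nat) : Int) :: PySem.List.pyRange ((n : Nat) : Int) 0 (-1) := by
      rw [PySem.List.pyRange_neg_one_cons (by exact_mod_cast Nat.succ_pos n), hc1]
    have hlen : (PySem.List.pyRange ((n : Nat) : Int) 0 (-1)).length = n := by
      rw [PySem.List.length_pyRange_neg_one]; simp
    set h : Int := 2 ^ (n + 1) with hh
    have hstep : ∀ r c : Int, stepB (0, r, c) ((n + 1 : Nat) : Int) =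
        ((if r ≥ h then 2 else 0) + (if c ≥ h then 1 else 0),
         (if r ≥ h then r % h else r), (if c ≥ h then c % h else c)) := by
      intro r c
      simp only [stepB, Int.toNat_natCast]
      rw [← hh]
      split_ifs <;> norm_num
    have hL : ((2 : Int) ^ (n + 2)) / 2 = h := by
      rw [hh, pow_succ]; exact Int.mul_ediv_cancel _ (by norm_num)
    have hidx : ((2 : Int) ^ (2 * (n + 1))) = 4 ^ (n + 1) := by
      rw [pow_mul]; norm_num
    rw [hrange, List.foldl_cons, hstep r c, stepB_acc, hlen]
    have hA : visitA (n + 2) r c =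
        if r < h ∧ c < h then visitA (n+1) r c
        else if r < h ∧ c ≥ h then 4^(n+1) + visitA (n+1) r (c % h)
        else if r ≥ h ∧ c < h then 4^(n+1) * 2 + visitA (n+1) (r % h) c
        else 4^(n+1) * 3 + visitA (n+1) (r % h) (c % h) := by
      simp only [visitA, hL, hidx]
    rw [hA]
    by_cases hrb : r ≥ h <;> by_cases hcb : c ≥ h
    · rw [if_neg (by omega), if_neg (by omega), if_neg (by omega)]
      simp only [if_pos hrb, if_pos hcb]
      rw [ih (r % h) (c % h)]; ring
    · rw [if_neg (by omega), if_neg (by omega), if_pos ⟨hrb, by omega⟩]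
      simp only [if_pos hrb, if_neg hcb]
      rw [ih (r % h) c]; ring
    · rw [if_neg (by omega), if_pos ⟨by omega, hcb⟩]
      simp only [if_neg hrb, if_pos hcb]
      rw [ih r (c % h)]; ring
    · rw [if_pos ⟨by omega, by omega⟩]
      simp only [if_neg hrb, if_neg hcb]
      rw [ih r c]; ring

-- ===== VERDICT (by name: the statement is the Claim_ definition above) =====
theorem visit_spec : Claim_equal_visit := by
  intro N r c _ hpre
  have hN : 1 ≤ N := hpre
  obtain ⟨n, hn⟩ : ∃ n : Nat, N = (n : Int) + 1 := by
    refine ⟨(N - 1).toNat, ?_⟩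
    have := Int.toNat_of_nonneg (a := N - 1) (by omega)
    omega
  subst hn
  show visit _ r c = visit_alt _ r c
  unfold visit visit_alt
  have h1 : ((n : Int) + 1).toNat = n + 1 := by omega
  have h2 : ((n : Int) + 1) - 1 = (n : Int) := by ring
  rw [h1, h2]
  exact key n r c
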